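-- pv_equiv track=rewrite | github.com/kogolobo/JAMDecoding | src/utils.py | uniform_paragraph_symbols
-- ===== SOURCE A (Python) =====
-- def uniform_paragraph_symbols(string):
--     new_string = ""
--     prev_char = ""
--     for char in string:
--         if char == "\t":
--             continue
--         if char == "\n":
--             if prev_char != "\n":
--                 new_string += "\n\t"
--         else:
--             new_string += char
--         prev_char = char
--     return new_string
-- ===== SOURCE B (Python) =====
-- def uniform_paragraph_symbols(string):
--     # pass 1: delete all tabs (they never appear in the output and do not break newline runs)
--     s = [c for c in string if c != '\t']
--     # pass 2: run-skipping scan: each maximal run of newlines becomes one "\n\t"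
--     out = []
--     i, n = 0, len(s)
--     while i < n:
--         if s[i] == '\n':
--             out.append('\n\t')
--             while i < n and s[i] == '\n':
--                 i += 1
--         else:
--             out.append(s[i])
--             i += 1
--     return ''.join(out)
-- ===== Notes on version B (the rewrite author's own statement) =====
-- stated objective: alternative
-- what changed: Replaces A's single stateful char loop with prev_char tracking by two passes: a comprehension that deletes all tabs, then a run-skipping scan that emits one newline-tab pair per maximal newline run and joins an output list.
import Mathlib
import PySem

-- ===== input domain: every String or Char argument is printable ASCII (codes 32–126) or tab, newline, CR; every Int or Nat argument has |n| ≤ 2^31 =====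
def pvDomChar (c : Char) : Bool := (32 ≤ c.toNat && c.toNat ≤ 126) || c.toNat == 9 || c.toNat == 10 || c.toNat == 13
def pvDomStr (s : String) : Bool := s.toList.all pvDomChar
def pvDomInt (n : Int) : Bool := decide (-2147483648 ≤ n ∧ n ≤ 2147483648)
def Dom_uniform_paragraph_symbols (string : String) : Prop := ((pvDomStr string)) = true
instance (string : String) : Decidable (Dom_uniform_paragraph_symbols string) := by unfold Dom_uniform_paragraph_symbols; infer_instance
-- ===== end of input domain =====

-- B deletes tabs in one pass and then collapses each maximal newline run with a run-skipping scan,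
-- instead of A's single stateful prev_char loop (objective: simpler/alternative; return value only).

-- ===== PORT A =====
-- state = (new_string, prev_char), both as lists of chars; tab 'continue' leaves the state untouched
def upsStep (st : List Char × List Char) (char : Char) : List Char × List Char :=
  if char = '\t' then st
  else
    let new_string :=
      if char = '\n' then
        (if st.2 ≠ ['\n'] then st.1 ++ ['\n', '\t'] else st.1)
      else st.1 ++ [char]
    (new_string, [char])

def uniform_paragraph_symbols (string : String) : String :=
  String.ofList (string.toList.foldl upsStep ([], [])).1

-- ===== PORT B =====
-- the run-skipping scan of Source B: a newline emits "\n\t" and the inner loop skips the rest of the run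
def upsScan : List Char → List Char
  | [] => []
  | c :: r =>
    if c = '\n' then '\n' :: '\t' :: upsScan (r.dropWhile (fun x => x = '\n'))
    else c :: upsScan r
  termination_by l => l.length
  decreasing_by
    · exact Nat.lt_succ_of_le (List.length_dropWhile_le _ r)
    · exact Nat.lt_succ_of_le (Nat.le_refl _)

def uniform_paragraph_symbols_alt (string : String) : String :=
  String.ofList (upsScan (string.toList.filter (fun c => c ≠ '\t')))

-- ===== PRECONDITION & SPEC =====
def Spec_uniform_paragraph_symbols (string : String) (out : String) : Prop := out = uniform_paragraph_symbols_alt string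
instance (string : String) (out : String) : Decidable (Spec_uniform_paragraph_symbols string out) := by unfold Spec_uniform_paragraph_symbols; infer_instance

-- ===== CLAIM (what is proved, stated in full; the proofs are below) =====
def Claim_equal_uniform_paragraph_symbols : Prop := ∀ (string : String), Dom_uniform_paragraph_symbols string → Spec_uniform_paragraph_symbols string (uniform_paragraph_symbols string)

-- ===== LEMMAS AND PROOFS =====

-- loop invariant: A's foldl over the remaining chars equals acc ++ B's scan of the tab-free rest,
-- where a pending prev_char = "\n" means the head of the current newline run was already emitted
theorem ups_invariant (l : List Char) : ∀ (acc prev : List Char),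
    (l.foldl upsStep (acc, prev)).1 =
      acc ++ (if prev = ['\n']
              then upsScan ((l.filter (fun c => c ≠ '\t')).dropWhile (fun x => x = '\n'))
              else upsScan (l.filter (fun c => c ≠ '\t'))) := by
  induction l with
  | nil => intro acc prev; split <;> simp [upsScan]
  | cons c r ih =>
    intro acc prev
    by_cases ht : c = '\t'
    · subst ht
      simp [upsStep, ih]
    · by_cases hn : c = '\n'
      · subst hn
        by_cases hp : prev = ['\n']
        · simp [upsStep, ih, hp]
        · simp [upsStep, ih, hp, upsScan]
      · simp only [List.foldl_cons, upsStep, if_neg ht, if_neg hn, List.filter_cons,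
          ih (acc ++ [c]) [c]]
        split <;> simp_all [upsScan]

-- ===== VERDICT (by name: the statement is the Claim_ definition above) =====
theorem uniform_paragraph_symbols_spec : Claim_equal_uniform_paragraph_symbols := by
  intro s _
  unfold Spec_uniform_paragraph_symbols uniform_paragraph_symbols uniform_paragraph_symbols_alt
  rw [ups_invariant s.toList [] []]
  simp
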